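-- pv_equiv track=rewrite | github.com/Mokuichi147/SchemaForm | main.py | normalize_field_order
-- ===== SOURCE A (Python) =====
-- from typing import Any, Iterable, Protocol
--
-- def normalize_field_order(schema: dict[str, Any], field_order: list[str] | None) -> list[str]:
--     properties = list(schema.get("properties", {}).keys())
--     if not field_order:
--         return properties
--     seen: set[str] = set()
--     ordered: list[str] = []
--     for key in field_order:
--         if key in properties and key not in seen:
--             ordered.append(key)
--             seen.add(key)
--     for key in properties:
--         if key not in seen:
--             ordered.append(key)
--     return ordered
-- ===== SOURCE B (Python) =====
-- def normalize_field_order(schema, field_order):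
--     properties = list(schema.get("properties", {}).keys())
--     if not field_order:
--         return properties
--     rank = {}
--     for i, key in enumerate(field_order):
--         rank.setdefault(key, i)
--     base = len(field_order)
--     for i, key in enumerate(properties):
--         rank.setdefault(key, base + i)
--     return sorted(properties, key=lambda key: rank[key])
-- ===== Notes on version B (the rewrite author's own statement) =====
-- stated objective: alternative
-- what changed: Replaces A's two sequential scans with an explicit seen-set by building a rank dict (field_order first-occurrence index, then offset schema index for the remaining properties) and returning one stable sort of the properties under that rank.
import Mathlib
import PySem

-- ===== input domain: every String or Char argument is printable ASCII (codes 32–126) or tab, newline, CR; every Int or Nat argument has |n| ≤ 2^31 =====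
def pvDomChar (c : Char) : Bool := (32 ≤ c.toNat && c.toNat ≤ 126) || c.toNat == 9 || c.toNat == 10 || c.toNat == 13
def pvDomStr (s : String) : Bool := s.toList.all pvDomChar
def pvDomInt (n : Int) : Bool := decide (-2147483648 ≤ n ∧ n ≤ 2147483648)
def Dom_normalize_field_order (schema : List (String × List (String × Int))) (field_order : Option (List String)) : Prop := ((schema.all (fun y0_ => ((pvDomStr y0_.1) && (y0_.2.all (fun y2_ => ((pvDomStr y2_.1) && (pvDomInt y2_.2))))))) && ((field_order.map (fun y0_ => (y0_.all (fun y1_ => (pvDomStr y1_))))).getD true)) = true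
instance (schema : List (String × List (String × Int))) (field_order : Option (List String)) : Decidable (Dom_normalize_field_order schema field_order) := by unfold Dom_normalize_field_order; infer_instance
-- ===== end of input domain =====

-- B replaces A's two scans with a seen-set by a rank map (field_order first-occurrence index,
-- then a shifted schema index for the rest) and one stable sort of the properties under it
-- (objective: alternative decomposition, similar cost).

-- ===== PORT A =====
def normalize_field_order (schema : List (String × List (String × Int))) (field_order : Option (List String)) : List String :=
  -- properties = list(schema.get("properties", {}).keys())
  let properties := (PySem.Dict.mk ((PySem.Dict.mk schema).getD "properties" [])).keys
  match field_order with
  | none => properties                                 -- if not field_order: return properties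
  | some fo =>
    if fo.isEmpty then properties                      -- if not field_order: return properties
    else
      -- seen = set(); ordered = []; for key in field_order: …
      let st := fo.foldl
        (fun (st : List String × PySem.Set String) key =>
          if properties.contains key && !(PySem.Set.contains st.2 key) then
            (st.1 ++ [key], PySem.Set.add st.2 key)
          else st)
        ([], PySem.Set.empty)
      -- for key in properties: if key not in seen: ordered.append(key)
      properties.foldl
        (fun ordered key => if !(PySem.Set.contains st.2 key) then ordered ++ [key] else ordered)
        st.1

-- ===== PORT B =====
def normalize_field_order_alt (schema : List (String × List (String × Int))) (field_order : Option (List String)) : List String :=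
  let properties := (PySem.Dict.mk ((PySem.Dict.mk schema).getD "properties" [])).keys
  match field_order with
  | none => properties
  | some fo =>
    if fo.isEmpty then properties
    else
      -- rank = {}; for i, key in enumerate(field_order): rank.setdefault(key, i)
      let rank := (PySem.List.enumerate fo).foldl
        (fun (d : PySem.Dict String Int) p => d.setdefault p.2 p.1) PySem.Dict.empty
      let base : Int := fo.length
      -- for i, key in enumerate(properties): rank.setdefault(key, base + i)
      let rank2 := (PySem.List.enumerate properties).foldl
        (fun (d : PySem.Dict String Int) p => d.setdefault p.2 (base + p.1)) rank
      -- sorted(properties, key=lambda key: rank[key]); every property was inserted by the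
      -- second loop, so rank[key] never raises: ported as getD with arbitrary default 0
      PySem.List.sorted properties (fun key => rank2.getD key 0)

-- ===== PRECONDITION & SPEC =====
-- Pre_ excludes association lists whose "properties" value carries duplicate keys: such a list
-- is not the encoding of any Python dict (dict keys are unique), so no Python input is excluded.
def Pre_normalize_field_order (schema : List (String × List (String × Int))) (field_order : Option (List String)) : Prop :=
  (((PySem.Dict.mk schema).getD "properties" []).map Prod.fst).Nodup
instance (schema : List (String × List (String × Int))) (field_order : Option (List String)) : Decidable (Pre_normalize_field_order schema field_order) := by unfold Pre_normalize_field_order; infer_instance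
def pvWitness_normalize_field_order : (List (String × List (String × Int))) × Option (List String) :=
  ([("properties", [("b", 1), ("a", 2)])], some ["a"])
def Spec_normalize_field_order (schema : List (String × List (String × Int))) (field_order : Option (List String)) (out : List String) : Prop := out = normalize_field_order_alt schema field_order
instance (schema : List (String × List (String × Int))) (field_order : Option (List String)) (out : List String) : Decidable (Spec_normalize_field_order schema field_order out) := by unfold Spec_normalize_field_order; infer_instance

-- ===== CLAIM (what is proved, stated in full; the proofs are below) =====
def Claim_equal_normalize_field_order : Prop := ∀ (schema : List (String × List (String × Int))) (field_order : Option (List String)), Dom_normalize_field_order schema field_order → Pre_normalize_field_order schema field_order → Spec_normalize_field_order schema field_order (normalize_field_order schema field_order)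

-- ===== LEMMAS AND PROOFS =====

-- the keys A's first loop collects: field_order first occurrences that name a property
def pvF (P fo : List String) : List String :=
  (PySem.Set.ofList fo).filter (fun k => P.contains k)

-- A's final list
def pvL (P fo : List String) : List String :=
  pvF P fo ++ P.filter (fun k => !PySem.Set.contains (pvF P fo) k)

-- the rank B's dict assigns
def pvKey (fo P : List String) (k : String) : Int :=
  if k ∈ fo then (List.idxOf k fo : Int) else (fo.length : Int) + (List.idxOf k P : Int)

lemma pvContains_eq (l : List String) (x : String) :
    PySem.Set.contains l x = decide (x ∈ l) := by
  rw [PySem.Set.contains_eq_listContains, Bool.eq_iff_iff]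
  simp

lemma pvMemF (P fo : List String) (x : String) : x ∈ pvF P fo ↔ x ∈ fo ∧ x ∈ P := by
  simp [pvF, List.mem_filter, PySem.Set.mem_ofList]

lemma pvOfList_append (fo : List String) (k : String) :
    PySem.Set.ofList (fo ++ [k]) = PySem.Set.add (PySem.Set.ofList fo) k := by
  simp [PySem.Set.ofList_eq_foldl]

lemma pvLoop1 (P : List String) (fo : List String) :
    fo.foldl
      (fun (st : List String × PySem.Set String) key =>
        if P.contains key && !(PySem.Set.contains st.2 key) then
          (st.1 ++ [key], PySem.Set.add st.2 key)
        else st)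
      ([], PySem.Set.empty)
    = (pvF P fo, pvF P fo) := by
  induction fo using List.reverseRecOn with
  | nil => rfl
  | append_singleton fo k ih =>
    rw [List.foldl_append, ih]
    simp only [List.foldl_cons, List.foldl_nil]
    have hF : pvF P (fo ++ [k]) =
        (PySem.Set.add (PySem.Set.ofList fo) k).filter (fun k => P.contains k) := by
      rw [pvF, pvOfList_append]
    by_cases hkfo : k ∈ fo
    · have hadd : PySem.Set.add (PySem.Set.ofList fo) k = PySem.Set.ofList fo := by
        simp [PySem.Set.add, PySem.Set.mem_ofList, hkfo]
      have hFe : pvF P (fo ++ [k]) = pvF P fo := by rw [hF, hadd]; rfl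
      rw [hFe]
      by_cases hkP : k ∈ P
      · simp
        intro _
        exact (pvMemF P fo k).2 ⟨hkfo, hkP⟩
      · simp
        intro h
        exact absurd h hkP
    · have hadd : PySem.Set.add (PySem.Set.ofList fo) k = PySem.Set.ofList fo ++ [k] := by
        simp [PySem.Set.add, PySem.Set.mem_ofList, hkfo]
      by_cases hkP : k ∈ P
      · have hFe : pvF P (fo ++ [k]) = pvF P fo ++ [k] := by
          rw [hF, hadd, List.filter_append]
          simp [hkP, pvF]
        have haddF : PySem.Set.add (pvF P fo) k = pvF P fo ++ [k] := by
          simp [PySem.Set.add]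
          intro hm
          exact hkfo ((pvMemF P fo k).1 hm).1
        simp [hFe, haddF]
        exact ⟨hkP, fun hm => hkfo ((pvMemF P fo k).1 hm).1⟩
      · have hFe : pvF P (fo ++ [k]) = pvF P fo := by
          rw [hF, hadd, List.filter_append]
          simp [hkP, pvF]
        simp [hFe]
        intro h
        exact absurd h hkP

lemma pvRankGet (l : List String) (s : Int) (f : Int → Int) (d : PySem.Dict String Int) (k : String) :
    ((PySem.List.enumerate l s).foldl (fun d p => d.setdefault p.2 (f p.1)) d).get? k
      = (d.get? k).or (if k ∈ l then some (f (s + (List.idxOf k l : Int))) else none) := by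
  induction l generalizing s d with
  | nil => simp [PySem.List.enumerate_nil]
  | cons a t ih =>
    rw [PySem.List.enumerate_cons]
    simp only [List.foldl_cons]
    rw [ih (s + 1) (d.setdefault a (f s))]
    by_cases hk : k = a
    · subst hk
      rw [PySem.Dict.get?_setdefault_self]
      have hidx : List.idxOf k (k :: t) = 0 := by simp
      rw [hidx]
      cases hd : d.get? k with
      | none => simp
      | some v => simp
    · rw [PySem.Dict.get?_setdefault_of_ne _ _ hk]
      have hba : (a == k) = false := beq_eq_false_iff_ne.mpr (fun h => hk h.symm)
      have hidx : List.idxOf k (a :: t) = List.idxOf k t + 1 := by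
        simp [List.idxOf_cons, hba]
      by_cases hmem : k ∈ t
      · have hcast : s + 1 + (List.idxOf k t : Int) = s + ((List.idxOf k t + 1 : Nat) : Int) := by
          push_cast; ring
        simp [hk, hmem, hidx, hcast]
      · simp [hk, hmem]

lemma pvOfListPairwise (fo : List String) :
    (PySem.Set.ofList fo).Pairwise (fun a b => List.idxOf a fo < List.idxOf b fo) := by
  induction fo using List.reverseRecOn with
  | nil => simp
  | append_singleton fo k ih =>
    rw [pvOfList_append]
    by_cases hkfo : k ∈ fo
    · have hadd : PySem.Set.add (PySem.Set.ofList fo) k = PySem.Set.ofList fo := by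
        simp [PySem.Set.add, PySem.Set.mem_ofList, hkfo]
      rw [hadd]
      refine List.Pairwise.imp_of_mem ?_ ih
      intro a b ha hb hab
      have ha' : a ∈ fo := (PySem.Set.mem_ofList fo a).1 ha
      have hb' : b ∈ fo := (PySem.Set.mem_ofList fo b).1 hb
      rw [List.idxOf_append, List.idxOf_append, if_pos ha', if_pos hb']
      exact hab
    · have hadd : PySem.Set.add (PySem.Set.ofList fo) k = PySem.Set.ofList fo ++ [k] := by
        simp [PySem.Set.add, PySem.Set.mem_ofList, hkfo]
      rw [hadd, List.pairwise_append]
      refine ⟨?_, List.pairwise_singleton _ _, ?_⟩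
      · refine List.Pairwise.imp_of_mem ?_ ih
        intro a b ha hb hab
        have ha' : a ∈ fo := (PySem.Set.mem_ofList fo a).1 ha
        have hb' : b ∈ fo := (PySem.Set.mem_ofList fo b).1 hb
        rw [List.idxOf_append, List.idxOf_append, if_pos ha', if_pos hb']
        exact hab
      · intro a ha b hb
        have ha' : a ∈ fo := (PySem.Set.mem_ofList fo a).1 ha
        have hb' : b = k := List.mem_singleton.1 hb
        subst hb'
        rw [List.idxOf_append, List.idxOf_append, if_pos ha', if_neg hkfo]
        have := List.idxOf_lt_length_of_mem ha'
        have hk0 : List.idxOf b [b] = 0 := by simp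
        omega

lemma pvNodupPairwiseIdx (P : List String) (hP : P.Nodup) :
    P.Pairwise (fun a b => List.idxOf a P < List.idxOf b P) := by
  rw [List.pairwise_iff_getElem]
  intro i j hi hj hij
  rw [List.Nodup.idxOf_getElem hP i hi, List.Nodup.idxOf_getElem hP j hj]
  exact hij

lemma pvMain (P fo : List String) (hP : P.Nodup) :
    pvL P fo = PySem.List.sorted P (fun key =>
      ((PySem.List.enumerate P).foldl
          (fun (d : PySem.Dict String Int) p => d.setdefault p.2 ((fo.length : Int) + p.1))
          ((PySem.List.enumerate fo).foldl
            (fun (d : PySem.Dict String Int) p => d.setdefault p.2 p.1) PySem.Dict.empty)).getD key 0) := by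
  -- the rank dictionaries, characterised
  have hget1 : ∀ k, ((PySem.List.enumerate fo).foldl
      (fun (d : PySem.Dict String Int) p => d.setdefault p.2 p.1) PySem.Dict.empty).get? k
      = if k ∈ fo then some ((List.idxOf k fo : Int)) else none := by
    intro k
    have h := pvRankGet fo 0 (fun x => x) PySem.Dict.empty k
    simpa [PySem.Dict.get?_empty] using h
  have hget2 : ∀ k ∈ P, ((PySem.List.enumerate P).foldl
      (fun (d : PySem.Dict String Int) p => d.setdefault p.2 ((fo.length : Int) + p.1))
      ((PySem.List.enumerate fo).foldl
        (fun (d : PySem.Dict String Int) p => d.setdefault p.2 p.1) PySem.Dict.empty)).get? k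
      = some (pvKey fo P k) := by
    intro k hk
    have h := pvRankGet P 0 (fun x => (fo.length : Int) + x)
      ((PySem.List.enumerate fo).foldl
        (fun (d : PySem.Dict String Int) p => d.setdefault p.2 p.1) PySem.Dict.empty) k
    rw [h, hget1 k]
    by_cases hkfo : k ∈ fo
    · simp [hkfo, pvKey]
    · simp [hkfo, hk, pvKey]
  have hkey : ∀ k ∈ P, ((PySem.List.enumerate P).foldl
      (fun (d : PySem.Dict String Int) p => d.setdefault p.2 ((fo.length : Int) + p.1))
      ((PySem.List.enumerate fo).foldl
        (fun (d : PySem.Dict String Int) p => d.setdefault p.2 p.1) PySem.Dict.empty)).getD k 0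
      = pvKey fo P k := by
    intro k hk
    rw [PySem.Dict.getD_eq_get?_getD, hget2 k hk]
    rfl
  -- permutation
  have hnF : (pvF P fo).Nodup := List.Nodup.filter _ (PySem.Set.nodup_ofList fo)
  have h1 : (pvF P fo).Perm (P.filter (fun x => PySem.Set.contains (pvF P fo) x)) := by
    rw [List.perm_ext_iff_of_nodup hnF (List.Nodup.filter _ hP)]
    intro a
    constructor
    · intro ha
      rcases (pvMemF P fo a).1 ha with ⟨hafo, haP⟩
      exact List.mem_filter.2 ⟨haP, by rw [pvContains_eq]; simpa using ha⟩
    · intro ha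
      rcases List.mem_filter.1 ha with ⟨haP, hc⟩
      rw [pvContains_eq] at hc
      simpa using hc
  have hperm : (pvL P fo).Perm P := by
    refine List.Perm.trans ?_ (List.filter_append_perm (fun x => PySem.Set.contains (pvF P fo) x) P)
    exact List.Perm.append_right _ h1
  -- pairwise strictly increasing ranks along pvL
  have hmemL : ∀ x ∈ pvL P fo, x ∈ P := by
    intro x hx
    rcases List.mem_append.1 hx with hx | hx
    · exact ((pvMemF P fo x).1 hx).2
    · exact (List.mem_filter.1 hx).1
  have hpwF : (pvF P fo).Pairwise (fun a b => pvKey fo P a < pvKey fo P b) := by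
    refine List.Pairwise.imp_of_mem ?_ (List.Pairwise.sublist List.filter_sublist (pvOfListPairwise fo))
    intro a b ha hb hab
    have ha' : a ∈ fo := ((pvMemF P fo a).1 ha).1
    have hb' : b ∈ fo := ((pvMemF P fo b).1 hb).1
    rw [pvKey, pvKey, if_pos ha', if_pos hb']
    exact_mod_cast hab
  have hpwR : (P.filter (fun k => !PySem.Set.contains (pvF P fo) k)).Pairwise
      (fun a b => pvKey fo P a < pvKey fo P b) := by
    refine List.Pairwise.imp_of_mem ?_ (List.Pairwise.sublist List.filter_sublist (pvNodupPairwiseIdx P hP))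
    intro a b ha hb hab
    have ha' : a ∉ fo := by
      rcases List.mem_filter.1 ha with ⟨haP, hc⟩
      rw [pvContains_eq] at hc
      intro hafo
      simp [pvMemF, hafo, haP] at hc
    have hb' : b ∉ fo := by
      rcases List.mem_filter.1 hb with ⟨hbP, hc⟩
      rw [pvContains_eq] at hc
      intro hbfo
      simp [pvMemF, hbfo, hbP] at hc
    rw [pvKey, pvKey, if_neg ha', if_neg hb']
    have : (List.idxOf a P : Int) < (List.idxOf b P : Int) := by exact_mod_cast hab
    omega
  have hcross : ∀ a ∈ pvF P fo, ∀ b ∈ P.filter (fun k => !PySem.Set.contains (pvF P fo) k),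
      pvKey fo P a < pvKey fo P b := by
    intro a ha b hb
    have ha' : a ∈ fo := ((pvMemF P fo a).1 ha).1
    have hb' : b ∉ fo := by
      rcases List.mem_filter.1 hb with ⟨hbP, hc⟩
      rw [pvContains_eq] at hc
      intro hbfo
      simp [pvMemF, hbfo, hbP] at hc
    rw [pvKey, pvKey, if_pos ha', if_neg hb']
    have h1 : List.idxOf a fo < fo.length := List.idxOf_lt_length_of_mem ha'
    omega
  have hpwKey : (pvL P fo).Pairwise (fun a b => pvKey fo P a < pvKey fo P b) :=
    List.pairwise_append.2 ⟨hpwF, hpwR, hcross⟩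
  have hpw : (pvL P fo).Pairwise (fun a b =>
      ((PySem.List.enumerate P).foldl
          (fun (d : PySem.Dict String Int) p => d.setdefault p.2 ((fo.length : Int) + p.1))
          ((PySem.List.enumerate fo).foldl
            (fun (d : PySem.Dict String Int) p => d.setdefault p.2 p.1) PySem.Dict.empty)).getD a 0
        < ((PySem.List.enumerate P).foldl
          (fun (d : PySem.Dict String Int) p => d.setdefault p.2 ((fo.length : Int) + p.1))
          ((PySem.List.enumerate fo).foldl
            (fun (d : PySem.Dict String Int) p => d.setdefault p.2 p.1) PySem.Dict.empty)).getD b 0) := by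
    refine List.Pairwise.imp_of_mem ?_ hpwKey
    intro a b ha hb hab
    rw [hkey a (hmemL a ha), hkey b (hmemL b hb)]
    exact hab
  exact (PySem.List.sorted_eq_of_perm_of_pairwise_lt P (pvL P fo) _ hperm hpw).symm

-- ===== VERDICT (by name: the statement is the Claim_ definition above) =====
theorem normalize_field_order_spec : Claim_equal_normalize_field_order := by
  intro schema field_order hdom hpre
  unfold Spec_normalize_field_order normalize_field_order normalize_field_order_alt
  cases field_order with
  | none => rfl
  | some fo =>
    simp only []
    by_cases hfo : fo.isEmpty
    · simp [hfo]
    · simp only [hfo, Bool.false_eq_true, if_false]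
      set P := (PySem.Dict.mk ((PySem.Dict.mk schema).getD "properties" [])).keys with hPdef
      have hP : P.Nodup := hpre
      rw [pvLoop1 P fo]
      have h2 := PySem.List.foldl_append_if
        (fun key => !PySem.Set.contains (pvF P fo, pvF P fo).2 key) (fun k : String => k) P
        (pvF P fo, pvF P fo).1
      simp only [List.map_id'] at h2
      rw [h2]
      exact pvMain P fo hP
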